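-- pv_equiv track=rewrite | github.com/jupyter-naas/abi | libs/naas-abi/naas_abi/apps/nexus/apps/api/app/api/endpoints/chat.py | _select_provider_model
-- ===== SOURCE A (Python) =====
-- def _select_provider_model(ollama_status: dict, has_images: bool) -> str:
--     """Select best available model from Ollama."""
--     preferred_models = [
--         "qwen3-vl:2b", "qwen3-vl", "qwen2.5vl:3b", "qwen2.5vl",
--         "llava", "moondream", "gemma3",
--     ] if has_images else [
--         "qwen3-vl:2b", "qwen2.5:3b", "qwen2.5:1.5b", "qwen2.5",
--         "llama3.2:3b", "llama3.2:1b", "llama3.2",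
--     ]
--     available = ollama_status["models"]
--     for pref in preferred_models:
--         for avail in available:
--             if pref in avail:
--                 return avail
--     return available[0]
-- ===== SOURCE B (Python) =====
-- def _select_provider_model(ollama_status: dict, has_images: bool) -> str:
--     """Select best available model from Ollama (keyed single-pass arg-min)."""
--     preferred_models = [
--         "qwen3-vl:2b", "qwen3-vl", "qwen2.5vl:3b", "qwen2.5vl",
--         "llava", "moondream", "gemma3",
--     ] if has_images else [
--         "qwen3-vl:2b", "qwen2.5:3b", "qwen2.5:1.5b", "qwen2.5",
--         "llama3.2:3b", "llama3.2:1b", "llama3.2",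
--     ]
--
--     def priority(model):
--         return next((i for i, p in enumerate(preferred_models) if p in model),
--                     len(preferred_models))
--
--     available = ollama_status["models"]
--     best = available[0]
--     best_p = priority(best)
--     for model in available[1:]:
--         p = priority(model)
--         if p < best_p:
--             best, best_p = model, p
--     return best
-- ===== Notes on version B (the rewrite author's own statement) =====
-- stated objective: alternative
-- what changed: Replaced the preference-ordered nested scan (outer loop over preferred models, inner over available) by a single arg-min pass over available models keyed by a priority function (index of first matching preference, len if none), with first-on-tie keeping A's tie-breaking and the all-miss case falling back to the first available model.
import Mathlib
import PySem

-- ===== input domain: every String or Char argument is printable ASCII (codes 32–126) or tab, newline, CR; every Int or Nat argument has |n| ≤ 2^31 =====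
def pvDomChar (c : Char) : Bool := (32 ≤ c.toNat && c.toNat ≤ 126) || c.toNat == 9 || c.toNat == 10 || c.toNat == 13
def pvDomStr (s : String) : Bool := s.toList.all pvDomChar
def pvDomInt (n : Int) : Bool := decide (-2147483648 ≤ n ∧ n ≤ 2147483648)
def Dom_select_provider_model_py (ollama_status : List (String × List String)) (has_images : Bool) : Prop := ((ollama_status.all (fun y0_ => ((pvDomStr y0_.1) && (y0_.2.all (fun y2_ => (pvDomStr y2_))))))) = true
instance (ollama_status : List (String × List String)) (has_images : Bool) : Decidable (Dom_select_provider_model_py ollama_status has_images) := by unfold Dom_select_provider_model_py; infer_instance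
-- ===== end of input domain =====

-- B replaces A's preference-ordered nested scan by a single keyed arg-min pass over the
-- available models (objective: alternative decomposition, same cost).

-- ===== PORT A =====
-- inner loop 'for avail in available: if pref in avail: return avail' = find?
-- outer loop 'for pref in preferred_models: …' with early return:
def pvLoopA (prefs : List String) (available : List String) : Option String :=
  match prefs with
  | [] => none
  | pref :: rest =>
    match available.find? (fun avail => PySem.Str.isIn pref avail) with
    | some avail => some avail
    | none => pvLoopA rest available

def select_provider_model_py (ollama_status : List (String × List String)) (has_images : Bool) : String :=
  let preferred_models : List String :=
    if has_images then
      ["qwen3-vl:2b", "qwen3-vl", "qwen2.5vl:3b", "qwen2.5vl", "llava", "moondream", "gemma3"]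
    else
      ["qwen3-vl:2b", "qwen2.5:3b", "qwen2.5:1.5b", "qwen2.5", "llama3.2:3b", "llama3.2:1b", "llama3.2"]
  let available := (PySem.Dict.get? ⟨ollama_status⟩ "models").getD []
  match pvLoopA preferred_models available with
  | some avail => avail
  | none => (PySem.List.pyGet? available 0).getD ""   -- available[0]; none (IndexError) excluded by Pre_

-- ===== PORT B =====
-- priority(model) = index of the first preferred substring contained in model, len(prefs) if none
def pvPrio (prefs : List String) (model : String) : Nat :=
  match prefs with
  | [] => 0
  | p :: ps => if PySem.Str.isIn p model then 0 else pvPrio ps model + 1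

-- the explicit arg-min loop of Source B ('for model in available[1:]: …')
def pvFoldB (k : String → Nat) (best : String) (bestP : Nat) (ms : List String) : String :=
  match ms with
  | [] => best
  | m :: rest => if k m < bestP then pvFoldB k m (k m) rest else pvFoldB k best bestP rest

def select_provider_model_py_alt (ollama_status : List (String × List String)) (has_images : Bool) : String :=
  let preferred_models : List String :=
    if has_images then
      ["qwen3-vl:2b", "qwen3-vl", "qwen2.5vl:3b", "qwen2.5vl", "llava", "moondream", "gemma3"]
    else
      ["qwen3-vl:2b", "qwen2.5:3b", "qwen2.5:1.5b", "qwen2.5", "llama3.2:3b", "llama3.2:1b", "llama3.2"]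
  let available := (PySem.Dict.get? ⟨ollama_status⟩ "models").getD []
  match available with
  | [] => ""   -- Source B raises IndexError here; excluded by Pre_
  | best :: rest => pvFoldB (pvPrio preferred_models) best (pvPrio preferred_models best) rest

-- ===== PRECONDITION & SPEC =====
-- Pre_ excludes exactly the inputs where A raises: a missing "models" key (KeyError) or an
-- empty model list (IndexError on available[0] when nothing matches).
def Pre_select_provider_model_py (ollama_status : List (String × List String)) (has_images : Bool) : Prop :=
  (PySem.Dict.get? ⟨ollama_status⟩ "models").getD [] ≠ []
instance (ollama_status : List (String × List String)) (has_images : Bool) : Decidable (Pre_select_provider_model_py ollama_status has_images) := by unfold Pre_select_provider_model_py; infer_instance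

def pvWitness_select_provider_model_py : (List (String × List String)) × Bool :=
  ([("models", ["llava:7b", "gemma3:4b"])], true)

def Spec_select_provider_model_py (ollama_status : List (String × List String)) (has_images : Bool) (out : String) : Prop := out = select_provider_model_py_alt ollama_status has_images
instance (ollama_status : List (String × List String)) (has_images : Bool) (out : String) : Decidable (Spec_select_provider_model_py ollama_status has_images out) := by unfold Spec_select_provider_model_py; infer_instance

-- ===== CLAIM (what is proved, stated in full; the proofs are below) =====
def Claim_equal_select_provider_model_py : Prop := ∀ (ollama_status : List (String × List String)) (has_images : Bool), Dom_select_provider_model_py ollama_status has_images → Pre_select_provider_model_py ollama_status has_images → Spec_select_provider_model_py ollama_status has_images (select_provider_model_py ollama_status has_images)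

-- ===== LEMMAS AND PROOFS =====

-- the arg-min fold never leaves its start when nothing strictly improves it
theorem pvFoldB_of_no_lt (k : String → Nat) (ms : List String) (b : String) (bp : Nat)
    (h : ∀ m ∈ ms, ¬ k m < bp) : pvFoldB k b bp ms = b := by
  induction ms with
  | nil => rfl
  | cons m rest ih =>
    have hm := h m (by simp)
    simp only [pvFoldB, if_neg hm]
    exact ih (fun x hx => h x (by simp [hx]))

-- if some element has key 0 and the running best is still positive, the fold returns
-- the FIRST element of key 0
theorem pvFoldB_find_zero (k : String → Nat) (ms : List String) (b : String) (bp : Nat)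
    (m : String) (hbp : 0 < bp) (hf : ms.find? (fun x => k x == 0) = some m) :
    pvFoldB k b bp ms = m := by
  induction ms generalizing b bp with
  | nil => simp at hf
  | cons x rest ih =>
    by_cases hx : k x = 0
    · have hxm : x = m := by simpa [List.find?_cons, hx] using hf
      rcases hxm with rfl
      simp only [pvFoldB, hx]
      rw [if_pos hbp]
      exact pvFoldB_of_no_lt _ _ _ _ (fun y _ => by omega)
    · have hf' : rest.find? (fun x => k x == 0) = some m := by
        simpa [List.find?_cons, hx] using hf
      simp only [pvFoldB]
      split
      · exact ih _ _ (by omega) hf'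
      · exact ih _ _ hbp hf'

-- shifting every key (and the running best) by one does not change the fold's result
theorem pvFoldB_shift (k k' : String → Nat) (ms : List String) (b : String) (bp : Nat)
    (h : ∀ x ∈ ms, k' x = k x + 1) : pvFoldB k' b (bp + 1) ms = pvFoldB k b bp ms := by
  induction ms generalizing b bp with
  | nil => rfl
  | cons m rest ih =>
    have hm : k' m = k m + 1 := h m (by simp)
    have hrest : ∀ x ∈ rest, k' x = k x + 1 := fun x hx => h x (by simp [hx])
    simp only [pvFoldB, hm]
    by_cases hlt : k m < bp
    · rw [if_pos (by omega), if_pos hlt]; exact ih _ _ hrest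
    · rw [if_neg (by omega), if_neg hlt]; exact ih _ _ hrest

-- the priority of model x against p :: ps is 0 exactly when p occurs in x
theorem pvPrio_cons_eq_zero (p : String) (ps : List String) (x : String) :
    (pvPrio (p :: ps) x == 0) = PySem.Str.isIn p x := by
  simp only [pvPrio, PySem.Str.isIn_eq]
  by_cases h : PySem.Chars.isIn p.toList x.toList = true
  · simp [h]
  · simp only [Bool.not_eq_true] at h
    simp [h]

-- core equivalence: B's keyed arg-min pass computes exactly A's nested-scan result
theorem pvMain (prefs : List String) (a : String) (rest : List String) :
    pvFoldB (pvPrio prefs) a (pvPrio prefs a) rest =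
      (match pvLoopA prefs (a :: rest) with
       | some m => m
       | none => a) := by
  induction prefs with
  | nil =>
    simp only [pvLoopA]
    exact pvFoldB_of_no_lt _ _ _ _ (fun m _ => by simp [pvPrio])
  | cons p ps ih =>
    by_cases ha : PySem.Chars.isIn p.toList a.toList = true
    · -- the head of available already contains p: both sides return it
      have hm : (a :: rest).find? (fun x => PySem.Str.isIn p x) = some a := by
        simp [ha]
      simp only [pvLoopA, hm]
      have h0 : pvPrio (p :: ps) a = 0 := by simp [pvPrio, ha]
      rw [h0]
      exact pvFoldB_of_no_lt _ _ _ _ (fun y _ => by omega)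
    · simp only [Bool.not_eq_true] at ha
      cases hm : rest.find? (fun x => PySem.Chars.isIn p.toList x.toList) with
      | some m =>
        have hcons : (a :: rest).find? (fun x => PySem.Str.isIn p x) = some m := by
          simp [ha]
          exact hm
        simp only [pvLoopA, hcons]
        apply pvFoldB_find_zero (pvPrio (p :: ps)) rest a _ m
        · simp [pvPrio, ha]
        · have hpred : (fun x => pvPrio (p :: ps) x == 0) = (fun x => PySem.Str.isIn p x) :=
            funext (pvPrio_cons_eq_zero p ps)
          rw [hpred]
          simpa using hm
      | none =>
        have hcons : (a :: rest).find? (fun x => PySem.Str.isIn p x) = none := by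
          simp [ha]
          intro x hx
          simpa using List.find?_eq_none.mp hm x hx
        have hall : ∀ x ∈ a :: rest, PySem.Chars.isIn p.toList x.toList = false := by
          intro x hx
          have := List.find?_eq_none.mp hcons x hx
          simpa using this
        simp only [pvLoopA, hcons]
        have hshift : ∀ x ∈ rest, pvPrio (p :: ps) x = pvPrio ps x + 1 := by
          intro x hx
          simp [pvPrio, hall x (by simp [hx])]
        have haa : pvPrio (p :: ps) a = pvPrio ps a + 1 := by
          simp [pvPrio, hall a (by simp)]
        rw [haa, pvFoldB_shift _ _ _ _ _ hshift, ih]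

-- ===== VERDICT (by name: the statement is the Claim_ definition above) =====
theorem select_provider_model_py_spec : Claim_equal_select_provider_model_py := by
  intro ollama_status has_images _hdom hpre
  unfold Spec_select_provider_model_py
  unfold Pre_select_provider_model_py at hpre
  unfold select_provider_model_py select_provider_model_py_alt
  dsimp only
  cases hav : (PySem.Dict.get? ⟨ollama_status⟩ "models").getD [] with
  | nil => exact absurd hav hpre
  | cons a rest =>
    dsimp only
    rw [pvMain]
    cases h : pvLoopA (if has_images then
        ["qwen3-vl:2b", "qwen3-vl", "qwen2.5vl:3b", "qwen2.5vl", "llava", "moondream", "gemma3"]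
      else
        ["qwen3-vl:2b", "qwen2.5:3b", "qwen2.5:1.5b", "qwen2.5", "llama3.2:3b", "llama3.2:1b", "llama3.2"]) (a :: rest) with
    | some m => rfl
    | none => simp [PySem.List.pyGet?, PySem.List.pyIdx?]
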